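-- pv_equiv track=rewrite | github.com/phorkyas-tg/advent-of-code | aoc2022/day07.py | getDirTotalSize
-- ===== SOURCE A (Python) =====
-- def getDirTotalSize(dirs):
--     dirTotalSize = {}
--     for key, value in dirs.items():
--         size = value
--
--         for subKey, subValue in dirs.items():
--             if subKey == key:
--                 continue
--
--             if subKey.startswith(key):
--                 size += subValue
--
--         dirTotalSize[key] = size
--     return dirTotalSize
-- ===== SOURCE B (Python) =====
-- def getDirTotalSize(dirs):
--     totals = {}
--     for key, value in dirs.items():
--         for i in range(len(key) + 1):
--             p = key[:i]
--             totals[p] = totals.get(p, 0) + value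
--     return {key: totals[key] for key in dirs}
-- ===== Notes on version B (the rewrite author's own statement) =====
-- stated objective: faster
-- what changed: Instead of A's nested scan comparing every key against every other key, B makes one pass that scatters each entry's value onto every prefix of its key in a hash map, then reads each key's total back with a single lookup.
import Mathlib
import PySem

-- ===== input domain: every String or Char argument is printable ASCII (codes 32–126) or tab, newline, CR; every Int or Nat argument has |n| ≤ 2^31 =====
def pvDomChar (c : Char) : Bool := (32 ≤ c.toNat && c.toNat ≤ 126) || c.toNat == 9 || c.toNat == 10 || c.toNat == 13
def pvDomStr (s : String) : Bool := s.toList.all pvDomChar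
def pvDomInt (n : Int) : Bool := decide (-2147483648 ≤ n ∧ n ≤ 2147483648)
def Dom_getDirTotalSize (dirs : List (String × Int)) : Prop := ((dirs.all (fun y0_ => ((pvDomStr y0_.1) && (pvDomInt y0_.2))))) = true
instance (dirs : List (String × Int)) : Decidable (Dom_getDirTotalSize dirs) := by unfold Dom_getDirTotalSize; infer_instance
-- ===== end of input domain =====

-- B replaces A's quadratic key-vs-key scan by a single pass scattering each value onto all prefixes
-- of its key in a dict, then one lookup per key (asymptotically faster; return value only).


-- ===== PORT A =====
def getDirTotalSize (dirs : List (String × Int)) : List (String × Int) :=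
  (dirs.foldl (fun dirTotalSize kv =>
      let size := dirs.foldl (fun size kv2 =>
        if kv2.1 == kv.1 then size
        else if PySem.Str.startswith kv2.1 kv.1 then size + kv2.2
        else size) kv.2
      dirTotalSize.insert kv.1 size)
    (PySem.Dict.empty : PySem.Dict String Int)).items

-- ===== PORT B =====
def getDirTotalSize_alt (dirs : List (String × Int)) : List (String × Int) :=
  let totals := dirs.foldl (fun totals kv =>
      (PySem.List.pyRange 0 (PySem.Str.len kv.1 + 1) 1).foldl
        (fun totals i => totals.modify (PySem.Str.slice kv.1 none (some i)) 0 (· + kv.2)) totals)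
    (PySem.Dict.empty : PySem.Dict String Int)
  -- Python's `totals[key]` never raises here (the i = len(key) round stores key itself), so getD is exact
  dirs.map (fun kv => (kv.1, totals.getD kv.1 0))

-- ===== PRECONDITION & SPEC =====
-- Pre_ excludes association lists with duplicate keys: A's argument is a Python dict, which cannot
-- represent duplicates (building it collapses them), so the list↔dict correspondence only covers nodup keys.
def Pre_getDirTotalSize (dirs : List (String × Int)) : Prop := (dirs.map Prod.fst).Nodup
instance (dirs : List (String × Int)) : Decidable (Pre_getDirTotalSize dirs) := by unfold Pre_getDirTotalSize; infer_instance
def pvWitness_getDirTotalSize : (List (String × Int)) := [("/", 10), ("/a", 5), ("/ab", 2), ("/b", 1)]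

def Spec_getDirTotalSize (dirs : List (String × Int)) (out : List (String × Int)) : Prop := out = getDirTotalSize_alt dirs
instance (dirs : List (String × Int)) (out : List (String × Int)) : Decidable (Spec_getDirTotalSize dirs out) := by unfold Spec_getDirTotalSize; infer_instance

-- ===== CLAIM (what is proved, stated in full; the proofs are below) =====
def Claim_equal_getDirTotalSize : Prop := ∀ (dirs : List (String × Int)), Dom_getDirTotalSize dirs → Pre_getDirTotalSize dirs → Spec_getDirTotalSize dirs (getDirTotalSize dirs)

-- ===== LEMMAS AND PROOFS =====

-- the value an A-row computes, and the per-row summand both sides reduce to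
def gdtsH (k : String) (kv2 : String × Int) : Int :=
  if PySem.Str.startswith kv2.1 k then kv2.2 else 0

def gdtsG (k : String) (kv2 : String × Int) : Int :=
  if kv2.1 == k then 0 else gdtsH k kv2

-- scattering a fixed value over a list of keys: the lookup counts occurrences
theorem gdts_getD_scatter (ps : List String) (t : PySem.Dict String Int) (k : String) (v : Int) :
    (ps.foldl (fun t p => t.modify p 0 (· + v)) t).getD k 0 = t.getD k 0 + v * (ps.count k : Int) := by
  induction ps generalizing t with
  | nil => simp
  | cons p ps ih =>
    rw [List.foldl_cons, ih, PySem.Dict.getD_modify, List.count_cons]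
    by_cases h : k = p
    · rw [if_pos h, if_pos (by simp [h])]
      subst h; push_cast; ring
    · rw [if_neg h, if_neg (by simpa using fun he => h he.symm)]
      push_cast; ring

-- the prefixes k2[:i], i = 0..len(k2), contain k exactly once iff k2.startswith(k)
theorem gdts_count_prefixes (k2 k : String) :
    (((List.range (k2.toList.length + 1)).map
        (fun i : Nat => PySem.Str.slice k2 none (some (i : Int)))).count k)
      = if PySem.Str.startswith k2 k then 1 else 0 := by
  have hsl : ∀ i : Nat, (PySem.Str.slice k2 none (some (i : Int))).toList = k2.toList.take i := by
    intro i; simp [PySem.Str.slice, PySem.List.slice_to_natCast]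
  rw [List.count_eq_countP, List.countP_map]
  by_cases h : PySem.Str.startswith k2 k
  · -- k = k2[:m] for m = |k|, and no other i gives k
    rw [if_pos h]
    rw [PySem.Str.startswith_eq, PySem.Chars.startswith_iff] at h
    obtain ⟨rest, hrest⟩ := h
    have hm : k.toList.length ≤ k2.toList.length := by
      rw [← hrest]; simp
    have hiff : ∀ i ∈ List.range (k2.toList.length + 1),
        (((fun x => x == k) ∘ (fun i : Nat => PySem.Str.slice k2 none (some (i : Int)))) i = true
          ↔ (i == k.toList.length) = true) := by
      intro i hi
      rw [List.mem_range] at hi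
      simp only [Function.comp, beq_iff_eq]
      constructor
      · intro he
        have hlen := congrArg List.length (congrArg String.toList he)
        rw [hsl, List.length_take] at hlen
        omega
      · intro he
        subst he
        apply String.ext
        rw [hsl, ← hrest]
        exact List.take_left' rfl
    rw [List.countP_congr hiff, ← List.count_eq_countP, List.count_range,
      if_pos (by omega)]

  · -- no prefix of k2 equals k
    rw [if_neg h]
    apply List.countP_eq_zero.mpr
    intro i _
    simp only [Function.comp, beq_iff_eq]
    intro he
    apply h
    rw [PySem.Str.startswith_eq, PySem.Chars.startswith_iff, ← he, hsl]
    exact List.take_prefix i k2.toList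

-- the inner pyRange loop of B is the scatter loop over the explicit prefix list
theorem gdts_prefixes_foldl (k2 : String) (v : Int) (t : PySem.Dict String Int) :
    (PySem.List.pyRange 0 (PySem.Str.len k2 + 1) 1).foldl
        (fun t i => t.modify (PySem.Str.slice k2 none (some i)) 0 (· + v)) t
      = ((List.range (k2.toList.length + 1)).map
          (fun i : Nat => PySem.Str.slice k2 none (some (i : Int)))).foldl
          (fun t p => t.modify p 0 (· + v)) t := by
  rw [PySem.Str.len_eq,
    show ((k2.toList.length : Int) + 1) = ((k2.toList.length + 1 : Nat) : Int) by push_cast; ring,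
    PySem.List.pyRange_zero_natCast, List.foldl_map, List.foldl_map]

-- B's dict after the whole scatter pass: lookup = sum of matching values
theorem gdts_totals (dirs : List (String × Int)) (t : PySem.Dict String Int) (k : String) :
    ((dirs.foldl (fun totals kv =>
        (PySem.List.pyRange 0 (PySem.Str.len kv.1 + 1) 1).foldl
          (fun totals i => totals.modify (PySem.Str.slice kv.1 none (some i)) 0 (· + kv.2)) totals) t)).getD k 0
      = t.getD k 0 + ((dirs.map (gdtsH k)).sum) := by
  induction dirs generalizing t with
  | nil => simp
  | cons kv dirs ih =>
    rw [List.foldl_cons, ih, gdts_prefixes_foldl, gdts_getD_scatter, gdts_count_prefixes]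
    simp only [List.map_cons, List.sum_cons, gdtsH]
    split_ifs <;> push_cast <;> ring

-- A's inner loop is kv.2 plus the sum of gdtsG
theorem gdts_inner (dirs : List (String × Int)) (k : String) (c : Int) :
    dirs.foldl (fun size kv2 =>
        if kv2.1 == k then size
        else if PySem.Str.startswith kv2.1 k then size + kv2.2
        else size) c
      = c + (dirs.map (gdtsG k)).sum := by
  induction dirs generalizing c with
  | nil => simp
  | cons kv2 dirs ih =>
    rw [List.foldl_cons]
    simp only [gdtsG, gdtsH, List.map_cons, List.sum_cons]
    split_ifs with h1 h2 <;> rw [ih] <;> ring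

-- with nodup keys, the self row contributes its own value exactly once
theorem gdts_self_sum (dirs : List (String × Int)) (kv : String × Int)
    (hnd : (dirs.map Prod.fst).Nodup) (hmem : kv ∈ dirs) :
    (dirs.map (fun kv2 => if kv2.1 == kv.1 then kv2.2 else 0)).sum = kv.2 := by
  induction dirs with
  | nil => cases hmem
  | cons hd dirs ih =>
    simp only [List.map_cons, List.sum_cons]
    rw [List.map_cons, List.nodup_cons] at hnd
    rcases List.mem_cons.mp hmem with heq | hmem'
    · subst heq
      rw [if_pos (by simp)]
      have : ∀ kv2 ∈ dirs, (if kv2.1 == kv.1 then kv2.2 else 0) = 0 := by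
        intro kv2 h2
        rw [if_neg]
        simp only [beq_iff_eq]
        intro he
        exact hnd.1 (he ▸ List.mem_map_of_mem h2)
      rw [List.sum_eq_zero (by intro x hx; obtain ⟨kv2, h2, rfl⟩ := List.mem_map.mp hx; exact this kv2 h2)]
      ring
    · by_cases hh : hd.1 == kv.1
      · exact absurd (beq_iff_eq.mp hh ▸ List.mem_map_of_mem hmem') hnd.1
      · rw [if_neg hh, ih hnd.2 hmem']; ring

-- per row: A's size equals B's lookup value
theorem gdts_row (dirs : List (String × Int)) (kv : String × Int)
    (hnd : (dirs.map Prod.fst).Nodup) (hmem : kv ∈ dirs) :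
    kv.2 + (dirs.map (gdtsG kv.1)).sum = (dirs.map (gdtsH kv.1)).sum := by
  have hsplit : ∀ kv2 : String × Int,
      gdtsH kv.1 kv2 = gdtsG kv.1 kv2 + (if kv2.1 == kv.1 then kv2.2 else 0) := by
    intro kv2
    simp only [gdtsG, gdtsH]
    by_cases h : (kv2.1 == kv.1) = true
    · have hst : PySem.Str.startswith kv2.1 kv.1 = true := by
        rw [beq_iff_eq.mp h, PySem.Str.startswith_eq, PySem.Chars.startswith_iff]
      rw [if_pos hst, if_pos h, if_pos h]; ring
    · rw [if_neg h, if_neg h]; ring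
  calc kv.2 + (dirs.map (gdtsG kv.1)).sum
      = (dirs.map (gdtsG kv.1)).sum + (dirs.map (fun kv2 => if kv2.1 == kv.1 then kv2.2 else 0)).sum := by
        rw [gdts_self_sum dirs kv hnd hmem]; ring
    _ = (dirs.map (gdtsH kv.1)).sum := by
        rw [← List.sum_map_add]
        exact congrArg List.sum (List.map_congr_left (fun kv2 _ => (hsplit kv2).symm))

-- ===== VERDICT (by name: the statement is the Claim_ definition above) =====
theorem getDirTotalSize_spec : Claim_equal_getDirTotalSize := by
  intro dirs _ hpre
  unfold Spec_getDirTotalSize getDirTotalSize getDirTotalSize_alt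
  rw [PySem.Dict.items_foldl_insert_fresh dirs Prod.fst
        (fun kv => dirs.foldl (fun size kv2 =>
          if kv2.1 == kv.1 then size
          else if PySem.Str.startswith kv2.1 kv.1 then size + kv2.2
          else size) kv.2)
        PySem.Dict.empty (by intro a _; exact PySem.Dict.contains_empty _) hpre]
  rw [show (PySem.Dict.empty : PySem.Dict String Int).items = [] from rfl, List.nil_append]
  apply List.map_congr_left
  intro kv hmem
  rw [gdts_inner, gdts_totals, PySem.Dict.getD_empty, gdts_row dirs kv hpre hmem, zero_add]
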